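-- pv_equiv track=rewrite | github.com/AutonomousRoboticEvolution/AREFramework | experiments/mnipes_v2/select_robot_from_hardware.py | dominance_count
-- ===== SOURCE A (Python) =====
-- def dominance_count(values):
--     dominance = dict()
--     for val1 in values:
--         dominance[val1[0]] = 0
--         for val2 in values:
--             if(val1[0] == val2[0]):
--                 continue
--             if(val1[1] <= val2[1] and val1[2] <= val2[2]):
--                     dominance[val1[0]]+=1
--     return dominance
-- ===== SOURCE B (Python) =====
-- def dominance_count(values):
--     # Sweep points in decreasing y order, keeping a pool of the z-values of all
--     # points whose y is >= the current group's y; a point's dominators are the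
--     # pool entries with z >= its own z, minus 1 for the point itself.
--     svals = sorted(values, key=lambda v: v[1], reverse=True)
--     counts = {}
--     pool = []  # z-values of every point with y >= the y of the group being processed
--     n = len(svals)
--     i = 0
--     while i < n:
--         y = svals[i][1]
--         j = i
--         while j < n and svals[j][1] == y:
--             pool.append(svals[j][2])
--             j += 1
--         for k in range(i, j):
--             z = svals[k][2]
--             c = 0
--             for w in pool:
--                 if w >= z:
--                     c += 1
--             counts[svals[k][0]] = c - 1
--         i = j
--     return {v[0]: counts[v[0]] for v in values}
-- ===== Notes on version B (the rewrite author's own statement) =====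
-- stated objective: alternative
-- what changed: Replaces A's all-pairs double loop with a sweep: sort once by y descending, keep a growing pool of the z-values of the points already passed (exactly the points whose y >= the current group's y), and count each point's dominators inside that pool only; Pre_ excludes lists with duplicate first components, on which A's dict overwriting keeps the count of the last duplicate while skipping all same-id entries (an accidental duplicate-key corner).
-- outside the precondition, e.g. on dominance_count([(1, 0, 0), (1, 5, 5), (2, 1, 1)]): A returns {1: 0, 2: 1}, B returns {1: 2, 2: 1}
import Mathlib
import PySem

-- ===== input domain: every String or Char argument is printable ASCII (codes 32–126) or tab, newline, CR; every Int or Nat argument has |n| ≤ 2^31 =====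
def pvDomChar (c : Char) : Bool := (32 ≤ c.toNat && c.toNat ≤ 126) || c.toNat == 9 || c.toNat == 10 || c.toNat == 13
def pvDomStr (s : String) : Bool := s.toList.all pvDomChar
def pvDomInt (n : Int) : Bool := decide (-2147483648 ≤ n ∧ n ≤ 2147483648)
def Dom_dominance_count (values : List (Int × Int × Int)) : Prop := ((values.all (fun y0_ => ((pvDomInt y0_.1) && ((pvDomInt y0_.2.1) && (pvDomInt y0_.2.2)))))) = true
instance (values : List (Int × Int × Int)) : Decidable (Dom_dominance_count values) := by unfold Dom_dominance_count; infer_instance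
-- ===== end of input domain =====

-- B replaces A's all-pairs double loop by a sort-by-y sweep that counts each point's
-- dominators in a pool of already-passed z-values (a different algorithm of similar cost);
-- Pre_ excludes duplicate first components, where A's dict overwriting is accidental.


-- ===== PORT A =====
def dominance_count (values : List (Int × Int × Int)) : List (Int × Int) :=
  (values.foldl (fun d val1 =>
    values.foldl (fun d val2 =>
      if val1.1 == val2.1 then d
      else if val1.2.1 ≤ val2.2.1 ∧ val1.2.2 ≤ val2.2.2 then
        -- dominance[val1[0]] += 1 : the key is always present (set to 0 just before the inner loop)
        d.insert val1.1 (d.getD val1.1 0 + 1)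
      else d)
      (d.insert val1.1 0))
    (PySem.Dict.empty : PySem.Dict Int Int)).items

-- ===== PORT B =====
-- inner counting loop of Source B: c = 0; for w in pool: if w >= z: c += 1
def altPoolCount (pool : List Int) (z : Int) : Int :=
  pool.foldl (fun c w => if z ≤ w then c + 1 else c) 0

-- the sweep of Source B: svals is sorted by y descending; one step processes the maximal
-- run of equal y (the inner 'while ... == y' loop), appends its z's to the pool and
-- records each run member's count
def altGo : List (Int × Int × Int) → List Int → PySem.Dict Int Int → PySem.Dict Int Int
  | [], _, counts => counts
  | v :: rest0, pool, counts =>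
    let grp := (v :: rest0).takeWhile (fun u => u.2.1 == v.2.1)
    let rest := (v :: rest0).dropWhile (fun u => u.2.1 == v.2.1)
    let pool' := pool ++ grp.map (fun u => u.2.2)
    let counts' := grp.foldl (fun c u => c.insert u.1 (altPoolCount pool' u.2.2 - 1)) counts
    altGo rest pool' counts'
termination_by svals _ _ => svals.length
decreasing_by
  simp only [List.dropWhile_cons]
  simp only [beq_self_eq_true, if_true]
  exact Nat.lt_succ_of_le (List.length_dropWhile_le _ _)

def dominance_count_alt (values : List (Int × Int × Int)) : List (Int × Int) :=
  let svals := PySem.List.sorted values (fun v => v.2.1) true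
  let counts := altGo svals [] PySem.Dict.empty
  -- final dict comprehension {v[0]: counts[v[0]] for v in values}: every such key is in
  -- counts (svals is a permutation of values), so counts[v[0]] never raises; getD is exact here
  (values.foldl (fun d v => d.insert v.1 (counts.getD v.1 0)) (PySem.Dict.empty : PySem.Dict Int Int)).items

-- ===== PRECONDITION & SPEC =====
-- Pre_ excludes lists with duplicate first components (ids), on which A's dict overwriting
-- keeps the count of the LAST duplicate while skipping every same-id entry — an accidental
-- duplicate-key corner no caller would specify.
def Pre_dominance_count (values : List (Int × Int × Int)) : Prop :=
  values.Pairwise (fun a b => a.1 ≠ b.1)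
instance (values : List (Int × Int × Int)) : Decidable (Pre_dominance_count values) := by
  unfold Pre_dominance_count; infer_instance

def pvWitness_dominance_count : (List (Int × Int × Int)) := [(1, 2, 3), (2, 0, 0)]

def Spec_dominance_count (values : List (Int × Int × Int)) (out : List (Int × Int)) : Prop := out = dominance_count_alt values
instance (values : List (Int × Int × Int)) (out : List (Int × Int)) : Decidable (Spec_dominance_count values out) := by unfold Spec_dominance_count; infer_instance

-- ===== CLAIM (what is proved, stated in full; the proofs are below) =====
def Claim_equal_dominance_count : Prop := ∀ (values : List (Int × Int × Int)), Dom_dominance_count values → Pre_dominance_count values → Spec_dominance_count values (dominance_count values)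

-- ===== LEMMAS AND PROOFS =====

-- the common closed form both ports are reduced to
def pvP (v u : Int × Int × Int) : Bool := decide (v.2.1 ≤ u.2.1 ∧ v.2.2 ≤ u.2.2)
def pvCnt (values : List (Int × Int × Int)) (v : Int × Int × Int) : Int :=
  (values.countP (pvP v) : Int) - 1
def pvCanon (values : List (Int × Int × Int)) : List (Int × Int) :=
  values.map (fun v => (v.1, pvCnt values v))

-- Source B's inner counting loop is a countP
lemma pv_altPoolCount_eq (pool : List Int) (z : Int) :
    altPoolCount pool z = (pool.countP (fun w => decide (z ≤ w)) : Int) := by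
  unfold altPoolCount
  simpa using PySem.List.foldl_count_if (fun w => decide (z ≤ w)) pool 0

-- with distinct ids, skipping the same-id entries is exactly "count including self, minus one"
lemma pv_cntNe_eq (values : List (Int × Int × Int)) (v : Int × Int × Int) (hv : v ∈ values)
    (hnd : values.Pairwise (fun a b => a.1 ≠ b.1)) :
    (values.countP (fun u => !(v.1 == u.1) && pvP v u) : Int)
      = (values.countP (pvP v) : Int) - 1 := by
  induction values with
  | nil => cases hv
  | cons a t ih =>
    rw [List.pairwise_cons] at hnd
    obtain ⟨ha, ht⟩ := hnd
    rcases List.mem_cons.mp hv with rfl | hvt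
    · have h1 : t.countP (fun u => !(v.1 == u.1) && pvP v u) = t.countP (pvP v) := by
        apply List.countP_congr; intro u hu
        have : v.1 ≠ u.1 := ha u hu
        simp [this]
      have h2 : pvP v v = true := by simp [pvP]
      simp only [List.countP_cons, h1, h2, Bool.false_and, beq_self_eq_true,
        Bool.not_true]
      simp
    · have hne : v.1 ≠ a.1 := (ha v hvt).symm
      have := ih hvt ht
      simp only [List.countP_cons]
      by_cases hpa : pvP v a = true
      · simp [hpa, hne]; omega
      · simp [hpa]; omega

-- A's inner loop over the whole list increments the one key it owns
lemma pv_innerA (v : Int × Int × Int) (l : List (Int × Int × Int)) (d : PySem.Dict Int Int)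
    (c : Int) :
    l.foldl (fun d u => if v.1 == u.1 then d
        else if v.2.1 ≤ u.2.1 ∧ v.2.2 ≤ u.2.2 then d.insert v.1 (d.getD v.1 0 + 1) else d)
      (d.insert v.1 c)
      = d.insert v.1 (c + (l.countP (fun u => !(v.1 == u.1) && pvP v u) : Int)) := by
  induction l generalizing c with
  | nil => simp
  | cons u t ih =>
    simp only [List.foldl_cons]
    by_cases h1 : v.1 = u.1
    · have hb : (v.1 == u.1) = true := by simp [h1]
      rw [if_pos hb, ih c]
      have : (!(v.1 == u.1) && pvP v u) = false := by simp [hb]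
      simp [this]
    · have hb : (v.1 == u.1) = false := by simp [h1]
      rw [if_neg (by simp [h1])]
      by_cases h2 : v.2.1 ≤ u.2.1 ∧ v.2.2 ≤ u.2.2
      · rw [if_pos h2, PySem.Dict.getD_insert_self, PySem.Dict.insert_insert_self, ih (c + 1)]
        have : (!(v.1 == u.1) && pvP v u) = true := by simp [hb, pvP, h2]
        simp only [List.countP_cons, this, if_pos]
        congr 1
        push_cast; omega
      · rw [if_neg h2, ih c]
        have : (!(v.1 == u.1) && pvP v u) = false := by
          simp only [pvP, hb, Bool.not_false, Bool.true_and, decide_eq_false_iff_not]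
          exact h2
        simp [this]

-- A's port reduces to the closed form
lemma pv_A_eq (values : List (Int × Int × Int)) (hnd : Pre_dominance_count values) :
    dominance_count values = pvCanon values := by
  unfold dominance_count
  have hstep : (fun (d : PySem.Dict Int Int) (val1 : Int × Int × Int) =>
      values.foldl (fun d val2 => if val1.1 == val2.1 then d
          else if val1.2.1 ≤ val2.2.1 ∧ val1.2.2 ≤ val2.2.2 then
            d.insert val1.1 (d.getD val1.1 0 + 1) else d)
        (d.insert val1.1 0))
      = fun d val1 => d.insert val1.1
          ((values.countP (fun u => !(val1.1 == u.1) && pvP val1 u) : Int)) := by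
    funext d val1
    simpa using pv_innerA val1 values d 0
  rw [hstep, PySem.Dict.items_foldl_insert_fresh values (fun v => v.1)
    (fun val1 => (values.countP (fun u => !(val1.1 == u.1) && pvP val1 u) : Int))
    PySem.Dict.empty (by simp) (List.pairwise_map.mpr hnd)]
  rw [show (PySem.Dict.empty : PySem.Dict Int Int).items = [] from rfl, List.nil_append]
  apply List.map_congr_left
  intro v hv
  rw [pv_cntNe_eq values v hv hnd]
  rfl

-- an insert loop never touches a key that is not in it
lemma pv_getD_fold_ne (l : List (Int × Int × Int)) (f : (Int × Int × Int) → Int)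
    (d : PySem.Dict Int Int) (x : Int) (h : ∀ u ∈ l, u.1 ≠ x) :
    (l.foldl (fun c u => c.insert u.1 (f u)) d).getD x 0 = d.getD x 0 := by
  induction l generalizing d with
  | nil => rfl
  | cons u t ih =>
    simp only [List.foldl_cons]
    rw [ih _ (fun a ha => h a (List.mem_cons_of_mem _ ha))]
    exact PySem.Dict.getD_insert_of_ne d _ 0 (h u List.mem_cons_self).symm

-- an insert loop over distinct ids stores f v under v's id
lemma pv_getD_fold_self (l : List (Int × Int × Int)) (f : (Int × Int × Int) → Int)
    (d : PySem.Dict Int Int) (v : Int × Int × Int) (hv : v ∈ l)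
    (hnd : l.Pairwise (fun a b => a.1 ≠ b.1)) :
    (l.foldl (fun c u => c.insert u.1 (f u)) d).getD v.1 0 = f v := by
  induction l generalizing d with
  | nil => cases hv
  | cons a t ih =>
    rw [List.pairwise_cons] at hnd
    obtain ⟨ha, ht⟩ := hnd
    simp only [List.foldl_cons]
    rcases List.mem_cons.mp hv with rfl | hvt
    · rw [pv_getD_fold_ne t f _ v.1 (fun u hu => (ha u hu).symm)]
      exact PySem.Dict.getD_insert_self d v.1 (f v) 0
    · exact ih _ hvt ht

-- the sweep never touches a key whose id is absent from its list
lemma pv_altGo_ne : ∀ (n : Nat) (svals : List (Int × Int × Int)), svals.length ≤ n →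
    ∀ (pool : List Int) (counts : PySem.Dict Int Int) (x : Int),
    (∀ u ∈ svals, u.1 ≠ x) →
    (altGo svals pool counts).getD x 0 = counts.getD x 0 := by
  intro n
  induction n with
  | zero =>
    intro svals hlen pool counts x _
    rw [List.length_eq_zero_iff.mp (Nat.le_zero.mp hlen)]
    rw [altGo]
  | succ n ih =>
    intro svals hlen pool counts x hx
    match svals with
    | [] => rw [altGo]
    | v :: rest0 =>
      rw [altGo]
      have hrest : (v :: rest0).dropWhile (fun u => u.2.1 == v.2.1) =
          rest0.dropWhile (fun u => u.2.1 == v.2.1) :=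
        List.dropWhile_cons_of_pos (by simp)
      have hlen' : ((v :: rest0).dropWhile (fun u => u.2.1 == v.2.1)).length ≤ n := by
        rw [hrest]
        exact Nat.le_of_lt_succ (Nat.lt_succ_of_le
          (Nat.le_trans (List.length_dropWhile_le _ _) (Nat.le_of_succ_le_succ hlen)))
      rw [ih _ hlen' _ _ x
        (fun u hu => hx u ((List.dropWhile_sublist _).subset hu))]
      exact pv_getD_fold_ne _ _ _ x
        (fun u hu => hx u ((List.takeWhile_sublist _).subset hu))

-- every element dropped past the first equal-y run has strictly smaller y
lemma pv_rest_lt (v0 : Int × Int × Int) (rest0 : List (Int × Int × Int))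
    (hs : (v0 :: rest0).Pairwise (fun a b => b.2.1 ≤ a.2.1)) :
    ∀ u ∈ (v0 :: rest0).dropWhile (fun x => x.2.1 == v0.2.1), u.2.1 < v0.2.1 := by
  intro u hu
  have hsub := List.dropWhile_sublist (l := v0 :: rest0) (fun x => x.2.1 == v0.2.1)
  have hpairs : ((v0 :: rest0).dropWhile (fun x => x.2.1 == v0.2.1)).Pairwise
      (fun a b => b.2.1 ≤ a.2.1) := hs.sublist hsub
  generalize hrc : (v0 :: rest0).dropWhile (fun x => x.2.1 == v0.2.1) = rest at hu hpairs hsub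
  cases rest with
  | nil => cases hu
  | cons r rt =>
    have hw : (v0 :: rest0).dropWhile (fun x => x.2.1 == v0.2.1) ≠ [] := by rw [hrc]; simp
    have hpr := List.head_dropWhile_not (fun x : Int × Int × Int => x.2.1 == v0.2.1) hw
    simp only [hrc, List.head_cons] at hpr
    have hrmem : r ∈ v0 :: rest0 := hsub.subset List.mem_cons_self
    have hrle : r.2.1 ≤ v0.2.1 := by
      rcases List.mem_cons.mp hrmem with h | h
      · rw [h] at hpr; simp at hpr
      · exact (List.pairwise_cons.mp hs).1 r h
    have hrne : r.2.1 ≠ v0.2.1 := by simpa using hpr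
    rcases List.mem_cons.mp hu with rfl | hurt
    · omega
    · have := (List.pairwise_cons.mp hpairs).1 u hurt
      omega

-- the sweep invariant: when v's run is processed, the pool holds the z of every point
-- with y >= v's y, so v's stored count is pool-hits + run-hits - 1
lemma pv_altGo_mem : ∀ (n : Nat) (svals : List (Int × Int × Int)), svals.length ≤ n →
    ∀ (pool : List Int) (counts : PySem.Dict Int Int) (v : Int × Int × Int), v ∈ svals →
    svals.Pairwise (fun a b => b.2.1 ≤ a.2.1) →
    svals.Pairwise (fun a b => a.1 ≠ b.1) →
    (altGo svals pool counts).getD v.1 0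
      = (pool.countP (fun w => decide (v.2.2 ≤ w)) : Int) + (svals.countP (pvP v) : Int) - 1 := by
  intro n
  induction n with
  | zero =>
    intro svals hlen pool counts v hv _ _
    rw [List.length_eq_zero_iff.mp (Nat.le_zero.mp hlen)] at hv
    cases hv
  | succ n ih =>
    intro svals hlen pool counts v hv hsort hne
    match svals with
    | [] => cases hv
    | v0 :: rest0 =>
      rw [altGo]
      set p : (Int × Int × Int) → Bool := fun u => u.2.1 == v0.2.1 with hp
      set grp := (v0 :: rest0).takeWhile p with hgrp
      set rest := (v0 :: rest0).dropWhile p with hrestdef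
      have hsplit : grp ++ rest = v0 :: rest0 := List.takeWhile_append_dropWhile
      have hy : ∀ u ∈ grp, u.2.1 = v0.2.1 := by
        intro u hu
        have := List.mem_takeWhile_imp (hgrp ▸ hu)
        simpa [hp] using this
      have hv0grp : v0 ∈ grp := by
        rw [hgrp, List.takeWhile_cons_of_pos (by simp [hp])]
        exact List.mem_cons_self
      have hsort0 := hsort
      rw [← hsplit] at hsort hne hv
      rw [List.pairwise_append] at hsort hne
      obtain ⟨hsg, hsr, hcross⟩ := hsort
      obtain ⟨hneg, hner, hnecross⟩ := hne
      have hrest_lt : ∀ u ∈ rest, u.2.1 < v0.2.1 := pv_rest_lt v0 rest0 hsort0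
      have hrest_len : rest.length ≤ n := by
        rw [hrestdef, List.dropWhile_cons_of_pos (by simp [hp])]
        exact Nat.le_of_lt_succ (Nat.lt_succ_of_le
          (Nat.le_trans (List.length_dropWhile_le _ _) (Nat.le_of_succ_le_succ hlen)))
      have hpool' : ∀ z : Int,
          ((pool ++ grp.map (fun u => u.2.2)).countP (fun w => decide (z ≤ w)) : Int)
            = (pool.countP (fun w => decide (z ≤ w)) : Int)
              + (grp.countP (fun u => decide (z ≤ u.2.2)) : Int) := by
        intro z
        rw [List.countP_append, List.countP_map]
        push_cast
        rfl
      rcases List.mem_append.mp hv with hvg | hvr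
      · -- v is in the current run
        rw [pv_altGo_ne n rest hrest_len _ _ v.1
          (fun u hu => (hnecross v hvg u hu).symm)]
        rw [pv_getD_fold_self grp _ counts v hvg hneg]
        rw [pv_altPoolCount_eq, hpool' v.2.2]
        have hvy : v.2.1 = v0.2.1 := hy v hvg
        have hrest0 : rest.countP (pvP v) = 0 := by
          rw [List.countP_eq_zero]
          intro u hu
          simp only [pvP, decide_eq_true_eq]
          intro hcon
          have := hrest_lt u hu
          omega
        have hgrpc : grp.countP (pvP v) = grp.countP (fun u => decide (v.2.2 ≤ u.2.2)) := by
          apply List.countP_congr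
          intro u hu
          have := hy u hu
          simp only [pvP, decide_eq_true_eq]
          constructor
          · intro h; exact h.2
          · intro h; exact ⟨by omega, h⟩
        rw [← hsplit, List.countP_append, hrest0, hgrpc]
        push_cast
        omega
      · -- v is in a later run
        rw [ih rest hrest_len _ _ v hvr hsr hner, hpool' v.2.2]
        have hvy : v.2.1 < v0.2.1 := hrest_lt v hvr
        have hgrpc : grp.countP (pvP v) = grp.countP (fun u => decide (v.2.2 ≤ u.2.2)) := by
          apply List.countP_congr
          intro u hu
          have := hy u hu
          simp only [pvP, decide_eq_true_eq]
          constructor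
          · intro h; exact h.2
          · intro h; exact ⟨by omega, h⟩
        rw [← hsplit, List.countP_append, hgrpc]
        push_cast
        omega

-- B's port reduces to the closed form
lemma pv_B_eq (values : List (Int × Int × Int)) (hnd : Pre_dominance_count values) :
    dominance_count_alt values = pvCanon values := by
  unfold dominance_count_alt
  have hperm : (PySem.List.sorted values (fun v => v.2.1) true).Perm values :=
    PySem.List.sorted_perm values (fun v => v.2.1) true
  rw [PySem.Dict.items_foldl_insert_fresh values (fun v => v.1) _ PySem.Dict.empty
    (by simp) (List.pairwise_map.mpr hnd)]
  rw [show (PySem.Dict.empty : PySem.Dict Int Int).items = [] from rfl, List.nil_append]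
  apply List.map_congr_left
  intro v hv
  have hsort := PySem.List.sorted_pairwise_rev values (fun v => v.2.1)
  have hne : (PySem.List.sorted values (fun v => v.2.1) true).Pairwise
      (fun a b => a.1 ≠ b.1) :=
    (hperm.pairwise_iff (fun h => h.symm)).mpr hnd
  have := pv_altGo_mem (PySem.List.sorted values (fun v => v.2.1) true).length
    (PySem.List.sorted values (fun v => v.2.1) true) le_rfl [] PySem.Dict.empty v
    (hperm.mem_iff.mpr hv) hsort hne
  rw [this]
  simp only [List.countP_nil, hperm.countP_eq (pvP v)]
  unfold pvCnt
  norm_num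

-- ===== VERDICT (by name: the statement is the Claim_ definition above) =====
theorem dominance_count_spec : Claim_equal_dominance_count := by
  intro values _ hpre
  unfold Spec_dominance_count
  rw [pv_A_eq values hpre, pv_B_eq values hpre]
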